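-- pv_equiv track=rewrite | github.com/Alone17120000/project_final | python_version/bai_toan_4.py | fcns_to_ap
-- ===== SOURCE A (Python) =====
-- from collections import deque
--
-- def fcns_to_al_tree(fc, ns): # Chuyển FCNS sang danh sách kề cây.
--     num_nodes = len(fc) # Lấy số đỉnh.
--     adj_list = {i: [] for i in range(num_nodes)} # Khởi tạo danh sách kề.
--     for i in range(num_nodes): # Lặp qua các đỉnh.
--         child = fc[i] # Lấy con cả của đỉnh i.
--         while child is not None: # Lặp qua các con của i.
--             adj_list[i].append(child) # Thêm cạnh (cha, con).
--             adj_list[child].append(i) # Thêm cạnh (con, cha).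
--             child = ns[child] # Chuyển sang em kế.
--     return adj_list # Trả về danh sách kề.
--
-- def fcns_to_ap(fc, ns): # Chuyển FCNS sang mảng cha (AP).
--     adj_list = fcns_to_al_tree(fc, ns) # Chuyển sang danh sách kề trước.
--     if not adj_list: return [] # Nếu rỗng thì trả về rỗng.
--     is_child = [False] * len(fc) # Mảng đánh dấu các đỉnh là con.
--     for i in range(len(fc)): # Lặp qua các đỉnh.
--         child = fc[i] # Lấy con cả.
--         while child is not None: # Lặp qua chuỗi con.
--             is_child[child] = True # Đánh dấu là con.
--             child = ns[child] # Chuyển sang em kế.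
--     try: # Khối xử lý lỗi.
--         root = is_child.index(False) # Gốc là đỉnh duy nhất không phải là con.
--     except ValueError: # Bắt lỗi nếu không tìm thấy gốc.
--         return [] # Trả về rỗng.
--     return al_tree_to_ap(adj_list, root) # Chuyển từ AL và gốc sang AP.
--
-- def al_tree_to_ap(adj_list, root_node=0): # Chuyển AL cây sang mảng cha (AP) bằng BFS.
--     num_nodes = len(adj_list) # Lấy số đỉnh.
--     parents = [None] * num_nodes # Khởi tạo mảng cha.
--     q = deque([root_node]) # Hàng đợi cho BFS, bắt đầu từ gốc.
--     visited = {root_node} # Tập hợp các đỉnh đã thăm.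
--     while q: # Khi hàng đợi còn phần tử.
--         u = q.popleft() # Lấy một đỉnh ra.
--         for v in adj_list[u]: # Lặp qua các đỉnh kề.
--             if v not in visited: # Nếu đỉnh kề chưa được thăm.
--                 visited.add(v) # Đánh dấu đã thăm.
--                 parents[v] = u # Gán cha cho đỉnh v.
--                 q.append(v) # Thêm v vào hàng đợi.
--     return parents # Trả về mảng cha.
-- ===== SOURCE B (Python) =====
-- def fcns_to_ap(fc, ns):
--     # Single pass: assign parents[child] = i directly while walking each
--     # first-child/next-sibling chain; no adjacency list, no BFS.
--     n = len(fc)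
--     parents = [None] * n
--     for i in range(n):
--         child = fc[i]
--         while child is not None:
--             parents[child] = i
--             child = ns[child]
--     if None not in parents:  # no root (also the empty input)
--         return []
--     return parents
-- ===== Notes on version B (the rewrite author's own statement) =====
-- stated objective: simpler
-- what changed: B drops A's three-phase pipeline (build an undirected adjacency dict, mark children, BFS from the root with a deque and a visited set) and instead writes parents[child] = i directly while walking each first-child/next-sibling chain once, returning [] when no root exists.
-- outside the precondition, e.g. on fcns_to_ap([1, 1], [None, None]): A returns [None, 0], B returns [None, 1]
import Mathlib
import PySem

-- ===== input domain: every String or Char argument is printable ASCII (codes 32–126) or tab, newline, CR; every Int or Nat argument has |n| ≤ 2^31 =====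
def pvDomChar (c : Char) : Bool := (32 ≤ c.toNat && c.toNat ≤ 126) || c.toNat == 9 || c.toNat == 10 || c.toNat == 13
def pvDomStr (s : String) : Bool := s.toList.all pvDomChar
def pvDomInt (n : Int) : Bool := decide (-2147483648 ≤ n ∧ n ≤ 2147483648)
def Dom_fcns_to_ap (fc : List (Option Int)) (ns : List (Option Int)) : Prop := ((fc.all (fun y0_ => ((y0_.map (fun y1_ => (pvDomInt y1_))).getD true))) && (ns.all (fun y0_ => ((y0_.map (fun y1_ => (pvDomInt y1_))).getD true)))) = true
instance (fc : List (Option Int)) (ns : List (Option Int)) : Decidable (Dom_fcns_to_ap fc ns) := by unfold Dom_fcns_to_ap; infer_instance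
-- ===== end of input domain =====

-- B replaces A's adjacency-list + BFS pipeline by a single chain walk that writes
-- parents[child] := i directly (objective: simpler; same O(n)).

-- ===== PORT A =====
-- inner 'while child is not None' of fcns_to_al_tree; fuel bounds the chain walk
-- (a chain longer than n revisits a node, i.e. the Python loops forever — outside Pre_).
-- The guard is where Python raises (KeyError: adj_list keys are exactly 0..n-1; IndexError on ns[child]).
def pvAWalk1 (ns : List (Option Int)) (n : Nat) (i : Int) :
    Nat → Option Int → PySem.Dict Int (List Int) → PySem.Dict Int (List Int)
  | _, none, d => d
  | 0, some _, d => d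
  | fuel+1, some c, d =>
    if 0 ≤ c ∧ c.toNat < n ∧ c.toNat < ns.length then
      pvAWalk1 ns n i fuel (ns.getD c.toNat none)
        ((d.modify i [] (· ++ [c])).modify c [] (· ++ [i]))
    else d

def fcns_to_al_tree (fc ns : List (Option Int)) : PySem.Dict Int (List Int) :=
  let n := fc.length
  let adj0 := (List.range n).foldl (fun d i => d.insert (i : Int) []) PySem.Dict.empty
  (List.range n).foldl (fun d (i : Nat) => pvAWalk1 ns n (i : Int) n (fc.getD i none) d) adj0

-- inner 'while child is not None' of the is_child marking loop (same guard/fuel discipline)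
def pvAWalk2 (ns : List (Option Int)) (n : Nat) : Nat → Option Int → List Bool → List Bool
  | _, none, b => b
  | 0, some _, b => b
  | fuel+1, some c, b =>
    if 0 ≤ c ∧ c.toNat < n ∧ c.toNat < ns.length then
      pvAWalk2 ns n fuel (ns.getD c.toNat none) (b.set c.toNat true)
    else b

-- the BFS 'while q' of al_tree_to_ap; the inner 'for v in adj_list[u]' is the foldl;
-- fuel n suffices: each dequeue matches an enqueue and at most n nodes are ever enqueued.
def pvBFS (adj : PySem.Dict Int (List Int)) :
    Nat → List Int → PySem.Set Int → List (Option Int) → List (Option Int)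
  | _, [], _, ps => ps
  | 0, _ :: _, _, ps => ps
  | fuel+1, u :: q, vis, ps =>
    let s := (adj.getD u []).foldl
      (fun (s : List Int × PySem.Set Int × List (Option Int)) v =>
        if PySem.Set.contains s.2.1 v then s
        else (s.1 ++ [v], PySem.Set.add s.2.1 v, PySem.List.pySetD s.2.2 v (some u)))
      (q, vis, ps)
    pvBFS adj fuel s.1 s.2.1 s.2.2

def al_tree_to_ap (adj : PySem.Dict Int (List Int)) (root : Int) : List (Option Int) :=
  let n := adj.size
  pvBFS adj n [root] (PySem.Set.add PySem.Set.empty root) (List.replicate n none)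

def fcns_to_ap (fc : List (Option Int)) (ns : List (Option Int)) : List (Option Int) :=
  let adj := fcns_to_al_tree fc ns
  if adj.size = 0 then []
  else
    let isChild := (List.range fc.length).foldl
      (fun b i => pvAWalk2 ns fc.length fc.length (fc.getD i none) b)
      (List.replicate fc.length false)
    match PySem.List.index? isChild false with
    | none => []          -- ValueError: no root
    | some root => al_tree_to_ap adj (root : Int)

-- ===== PORT B =====
-- B's single chain walk: parents[child] := i, child := ns[child]; fuel as in A's walks.
def pvBWalk (ns : List (Option Int)) (i : Int) :
    Nat → Option Int → List (Option Int) → List (Option Int)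
  | _, none, ps => ps
  | 0, some _, ps => ps
  | fuel+1, some c, ps =>
    if PySem.Raise.InRange ps.length c then  -- parents[child] = i (negative index wraps)
      if PySem.Raise.InRange ns.length c then  -- child = ns[child]
        pvBWalk ns i fuel (PySem.List.pyGetD ns c none) (PySem.List.pySetD ps c (some i))
      else PySem.List.pySetD ps c (some i)  -- IndexError on ns[child]: outside Pre_
    else ps  -- IndexError on parents[child]: outside Pre_

def fcns_to_ap_alt (fc : List (Option Int)) (ns : List (Option Int)) : List (Option Int) :=
  let n := fc.length
  -- fuel: a terminating Python walk makes at most 2*len(ns) wrapping steps (distinct child values)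
  let parents := (List.range n).foldl
    (fun ps (i : Nat) => pvBWalk ns (i : Int) (n + 2 * ns.length + 1) (fc.getD i none) ps)
    (List.replicate n (none : Option Int))
  if (none : Option Int) ∈ parents then parents else []

-- ===== PRECONDITION & SPEC =====
-- pvStep is one step along a next-sibling chain: from (a valid) child c to ns[c]
-- (none once the chain ends or leaves the valid index range).
def pvStep (ns : List (Option Int)) (n : Nat) (oc : Option Int) : Option Int :=
  oc.bind fun c =>
    if 0 ≤ c ∧ c.toNat < n ∧ c.toNat < ns.length then ns.getD c.toNat none else none

-- node i's chain is exhausted within n steps and every value met on it is a valid index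
def pvOkAt (fc ns : List (Option Int)) (i : Nat) : Bool :=
  ((pvStep ns fc.length)^[fc.length] (fc.getD i none) == none) &&
  (List.range fc.length).all fun k =>
    ((pvStep ns fc.length)^[k] (fc.getD i none)).all fun c =>
      decide (0 ≤ c ∧ c.toNat < fc.length ∧ c.toNat < ns.length)

-- the children of node i, in chain order: fc[i], ns[fc[i]], …
def pvKids (fc ns : List (Option Int)) (i : Nat) : List Int :=
  (List.range fc.length).filterMap fun k => (pvStep ns fc.length)^[k] (fc.getD i none)

def pvChildren (fc ns : List (Option Int)) : List Int :=
  (List.range fc.length).flatMap (pvKids fc ns)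

-- the first index that is nobody's child (A's root), and the parent of a child
def pvRoot? (fc ns : List (Option Int)) : Option Nat :=
  (List.range fc.length).find? (fun j => !decide ((j : Int) ∈ pvChildren fc ns))

def pvParIdx (fc ns : List (Option Int)) (c : Int) : Nat :=
  ((List.range fc.length).find? (fun i => decide (c ∈ pvKids fc ns i))).getD 0

-- one step up the parent relation
def pvPStep (fc ns : List (Option Int)) (oc : Option Int) : Option Int :=
  oc.bind fun c =>
    if c ∈ pvChildren fc ns then some ((pvParIdx fc ns c : Nat) : Int) else none

-- c's ancestor chain meets node r within n steps
def pvReaches (fc ns : List (Option Int)) (r : Nat) (c : Int) : Bool :=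
  (List.range (fc.length + 1)).any fun k => (pvPStep fc ns)^[k] (some c) == some ((r : Nat) : Int)

-- Pre_ excludes (a) inputs on which A raises (a chain value outside the valid index range) or
-- loops forever (a cyclic next-sibling chain), and (b) malformed FCNS inputs that do not encode
-- a single rooted tree (a node claimed as child twice, or a second non-singleton tree): there
-- A's value is an accident of its BFS traversal order from the first root. Valid single-tree
-- encodings, inputs with no root at all and extra isolated nodes all stay inside Pre_.
def Pre_fcns_to_ap (fc : List (Option Int)) (ns : List (Option Int)) : Prop :=
  (∀ i ∈ List.range fc.length, pvOkAt fc ns i = true) ∧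
  ((∀ j ∈ List.range fc.length, (j : Int) ∈ pvChildren fc ns) ∨
   ((pvChildren fc ns).Nodup ∧
    ∀ c ∈ pvChildren fc ns, pvReaches fc ns ((pvRoot? fc ns).getD 0) c = true))
instance (fc : List (Option Int)) (ns : List (Option Int)) : Decidable (Pre_fcns_to_ap fc ns) := by
  unfold Pre_fcns_to_ap; infer_instance

def pvWitness_fcns_to_ap : List (Option Int) × List (Option Int) :=
  ([some 1, some 3, none, none], [none, some 2, none, none])

def Spec_fcns_to_ap (fc : List (Option Int)) (ns : List (Option Int)) (out : List (Option Int)) : Prop :=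
  out = fcns_to_ap_alt fc ns
instance (fc : List (Option Int)) (ns : List (Option Int)) (out : List (Option Int)) :
    Decidable (Spec_fcns_to_ap fc ns out) := by unfold Spec_fcns_to_ap; infer_instance

-- ===== CLAIM (what is proved, stated in full; the proofs are below) =====
def Claim_equal_fcns_to_ap : Prop :=
  ∀ (fc : List (Option Int)) (ns : List (Option Int)),
    Dom_fcns_to_ap fc ns → Pre_fcns_to_ap fc ns → Spec_fcns_to_ap fc ns (fcns_to_ap fc ns)

-- ===== LEMMAS AND PROOFS =====

-- proof-side helper: the chain as a recursive list builder, tied to pvKids below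
def pvChain? (ns : List (Option Int)) (n : Nat) : Nat → Option Int → Option (List Int)
  | _, none => some []
  | 0, some _ => none
  | fuel+1, some c =>
    if 0 ≤ c ∧ c.toNat < n ∧ c.toNat < ns.length then
      (pvChain? ns n fuel (ns.getD c.toNat none)).map (c :: ·)
    else none

theorem pvChain?_of_ok {ns : List (Option Int)} {n : Nat} :
    ∀ (f : Nat) (start : Option Int),
      (pvStep ns n)^[f] start = none →
      (∀ k, k < f → ∀ c, (pvStep ns n)^[k] start = some c →
        0 ≤ c ∧ c.toNat < n ∧ c.toNat < ns.length) →
      pvChain? ns n f start = some ((List.range f).filterMap fun k => (pvStep ns n)^[k] start) := by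
  intro f
  induction f with
  | zero => intro start h0 _; simp at h0; simp [h0, pvChain?]
  | succ f ih =>
    intro start hterm hvalid
    match start with
    | none =>
      have hfix : ∀ k, (pvStep ns n)^[k] (none : Option Int) = none := by
        intro k; exact Function.iterate_fixed rfl k
      simp [pvChain?, List.filterMap_eq_nil_iff]
      intro k _; simp [hfix k]
    | some c =>
      have hc := hvalid 0 (by omega) c rfl
      have hstep : pvStep ns n (some c) = ns.getD c.toNat none := by
        simp [pvStep, hc]
      have hterm' : (pvStep ns n)^[f] (ns.getD c.toNat none) = none := by
        rw [← hstep, ← Function.iterate_succ_apply]; exact hterm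
      have hvalid' : ∀ k, k < f → ∀ c', (pvStep ns n)^[k] (ns.getD c.toNat none) = some c' →
          0 ≤ c' ∧ c'.toNat < n ∧ c'.toNat < ns.length := by
        intro k hk c' hc'
        refine hvalid (k+1) (by omega) c' ?_
        rw [Function.iterate_succ_apply, hstep]; exact hc'
      have := ih (ns.getD c.toNat none) hterm' hvalid'
      simp only [pvChain?, if_pos hc, this, Option.map_some]
      congr 1
      rw [List.range_succ_eq_map, List.filterMap_cons, List.filterMap_map]
      simp only [Function.iterate_zero_apply]
      congr 1
      apply List.filterMap_congr
      intro k _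
      simp [Function.comp, Function.iterate_succ_apply, hstep]

theorem pvChain?_of_okAt {fc ns : List (Option Int)} {i : Nat} (h : pvOkAt fc ns i = true) :
    pvChain? ns fc.length fc.length (fc.getD i none) = some (pvKids fc ns i) := by
  unfold pvOkAt at h
  simp only [Bool.and_eq_true, beq_iff_eq, List.all_eq_true, List.mem_range] at h
  obtain ⟨h1, h2⟩ := h
  refine pvChain?_of_ok fc.length (fc.getD i none) h1 ?_
  intro k hk c hc
  have := h2 k hk
  rw [hc] at this
  simpa using this

theorem pvChain?_mem {ns : List (Option Int)} {n : Nat} :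
    ∀ {f : Nat} {oc : Option Int} {L : List Int}, pvChain? ns n f oc = some L →
      ∀ c ∈ L, 0 ≤ c ∧ c.toNat < n ∧ c.toNat < ns.length := by
  intro f
  induction f with
  | zero =>
    intro oc L h c hc
    match oc with
    | none => simp [pvChain?] at h; subst h; simp at hc
    | some c' => simp [pvChain?] at h
  | succ f ih =>
    intro oc L h c hc
    match oc with
    | none => simp [pvChain?] at h; subst h; simp at hc
    | some c' =>
      unfold pvChain? at h
      by_cases hg : 0 ≤ c' ∧ c'.toNat < n ∧ c'.toNat < ns.length
      · rw [if_pos hg] at h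
        match hrec : pvChain? ns n f (ns.getD c'.toNat none) with
        | none => rw [hrec] at h; simp at h
        | some L' =>
          rw [hrec] at h
          simp only [Option.map_some, Option.some.injEq] at h
          subst h
          rcases List.mem_cons.mp hc with rfl | hcm
          · exact hg
          · exact ih hrec c hcm
      · rw [if_neg hg] at h; simp at h

theorem pvAWalk1_eq {ns : List (Option Int)} {n : Nat} {i : Int} :
    ∀ {f : Nat} {oc : Option Int} {L : List Int} (d : PySem.Dict Int (List Int)),
      pvChain? ns n f oc = some L →
      pvAWalk1 ns n i f oc d
        = L.foldl (fun d c => (d.modify i [] (· ++ [c])).modify c [] (· ++ [i])) d := by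
  intro f
  induction f with
  | zero =>
    intro oc L d h
    match oc with
    | none => simp [pvChain?] at h; subst h; simp [pvAWalk1]
    | some c => simp [pvChain?] at h
  | succ f ih =>
    intro oc L d h
    match oc with
    | none => simp [pvChain?] at h; subst h; simp [pvAWalk1]
    | some c =>
      unfold pvChain? at h
      by_cases hg : 0 ≤ c ∧ c.toNat < n ∧ c.toNat < ns.length
      · rw [if_pos hg] at h
        match hrec : pvChain? ns n f (ns.getD c.toNat none) with
        | none => rw [hrec] at h; simp at h
        | some L' =>
          rw [hrec] at h
          simp only [Option.map_some, Option.some.injEq] at h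
          subst h
          simp only [pvAWalk1, if_pos hg, List.foldl_cons]
          exact ih _ hrec
      · rw [if_neg hg] at h; simp at h

theorem pvAWalk2_eq {ns : List (Option Int)} {n : Nat} :
    ∀ {f : Nat} {oc : Option Int} {L : List Int} (b : List Bool),
      pvChain? ns n f oc = some L →
      pvAWalk2 ns n f oc b = L.foldl (fun b c => b.set c.toNat true) b := by
  intro f
  induction f with
  | zero =>
    intro oc L b h
    match oc with
    | none => simp [pvChain?] at h; subst h; simp [pvAWalk2]
    | some c => simp [pvChain?] at h
  | succ f ih =>
    intro oc L b h
    match oc with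
    | none => simp [pvChain?] at h; subst h; simp [pvAWalk2]
    | some c =>
      unfold pvChain? at h
      by_cases hg : 0 ≤ c ∧ c.toNat < n ∧ c.toNat < ns.length
      · rw [if_pos hg] at h
        match hrec : pvChain? ns n f (ns.getD c.toNat none) with
        | none => rw [hrec] at h; simp at h
        | some L' =>
          rw [hrec] at h
          simp only [Option.map_some, Option.some.injEq] at h
          subst h
          simp only [pvAWalk2, if_pos hg, List.foldl_cons]
          exact ih _ hrec
      · rw [if_neg hg] at h; simp at h

theorem pvChain?_mono {ns : List (Option Int)} {n : Nat} :
    ∀ {f f' : Nat}, f ≤ f' → ∀ {oc : Option Int} {L : List Int},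
      pvChain? ns n f oc = some L → pvChain? ns n f' oc = some L := by
  intro f
  induction f with
  | zero =>
    intro f' _ oc L h
    match oc with
    | none => simp [pvChain?] at h; subst h; cases f' <;> simp [pvChain?]
    | some c => simp [pvChain?] at h
  | succ f ih =>
    intro f' hle oc L h
    match oc with
    | none => simp [pvChain?] at h; subst h; cases f' <;> simp [pvChain?]
    | some c =>
      match f' with
      | 0 => omega
      | f'' + 1 =>
        unfold pvChain? at h ⊢
        by_cases hg : 0 ≤ c ∧ c.toNat < n ∧ c.toNat < ns.length
        · rw [if_pos hg] at h ⊢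
          match hrec : pvChain? ns n f (ns.getD c.toNat none) with
          | none => rw [hrec] at h; simp at h
          | some L' =>
            rw [hrec] at h
            rw [ih (by omega) hrec]
            exact h
        · rw [if_neg hg] at h; simp at h

theorem pvBWalk_eq {ns : List (Option Int)} {n : Nat} {i : Int} :
    ∀ {f : Nat} {oc : Option Int} {L : List Int} (ps : List (Option Int)), n ≤ ps.length →
      pvChain? ns n f oc = some L →
      pvBWalk ns i f oc ps = L.foldl (fun ps c => PySem.List.pySetD ps c (some i)) ps := by
  intro f
  induction f with
  | zero =>
    intro oc L ps _ h
    match oc with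
    | none => simp [pvChain?] at h; subst h; simp [pvBWalk]
    | some c => simp [pvChain?] at h
  | succ f ih =>
    intro oc L ps hlen h
    match oc with
    | none => simp [pvChain?] at h; subst h; simp [pvBWalk]
    | some c =>
      unfold pvChain? at h
      by_cases hg : 0 ≤ c ∧ c.toNat < n ∧ c.toNat < ns.length
      · rw [if_pos hg] at h
        match hrec : pvChain? ns n f (ns.getD c.toNat none) with
        | none => rw [hrec] at h; simp at h
        | some L' =>
          rw [hrec] at h
          simp only [Option.map_some, Option.some.injEq] at h
          subst h
          have hps : PySem.Raise.InRange ps.length c := by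
            unfold PySem.Raise.InRange; omega
          have hns : PySem.Raise.InRange ns.length c := by
            unfold PySem.Raise.InRange; omega
          have hget : PySem.List.pyGetD ns c none = ns.getD c.toNat none := by
            rw [PySem.List.pyGetD_eq_getElem ns none hg.1 (by omega)]
            exact (List.getD_eq_getElem ns none hg.2.2).symm
          simp only [pvBWalk, if_pos hps, if_pos hns, hget, List.foldl_cons]
          exact ih _ (by rw [PySem.List.length_pySetD ps c (some i)]; exact hlen) hrec
      · rw [if_neg hg] at h; simp at h

theorem writeFold_length :
    ∀ (ks : List Int) (i : Int) (ps : List (Option Int)),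
      (ks.foldl (fun ps c => PySem.List.pySetD ps c (some i)) ps).length = ps.length := by
  intro ks
  induction ks with
  | nil => intro i ps; rfl
  | cons c rest ih =>
    intro i ps
    simp only [List.foldl_cons]
    rw [ih, PySem.List.length_pySetD]

theorem foldl_inner_flatMap {α β σ : Type} (K : α → List β) (g : σ → β → α → σ) :
    ∀ (l : List α) (s0 : σ),
      l.foldl (fun s i => (K i).foldl (fun s c => g s c i) s) s0
        = (l.flatMap (fun i => (K i).map (fun c => (c, i)))).foldl (fun s p => g s p.1 p.2) s0 := by
  intro l
  induction l with
  | nil => intro s0; simp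
  | cons x xs ih =>
    intro s0
    simp only [List.foldl_cons, List.flatMap_cons, List.foldl_append, List.foldl_map]
    exact ih _

theorem foldl_pySetD_length :
    ∀ (pairs : List (Int × Int)) (ps : List (Option Int)),
      (pairs.foldl (fun ps p => PySem.List.pySetD ps p.1 (some p.2)) ps).length = ps.length := by
  intro pairs
  induction pairs with
  | nil => intro ps; simp
  | cons p rest ih =>
    intro ps
    simp only [List.foldl_cons]
    rw [ih, PySem.List.length_pySetD]

theorem foldl_pySetD_getElem? :
    ∀ (pairs : List (Int × Int)) (ps : List (Option Int)) (j : Nat), j < ps.length →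
      (∀ p ∈ pairs, 0 ≤ p.1) →
      (pairs.foldl (fun ps p => PySem.List.pySetD ps p.1 (some p.2)) ps)[j]?
        = (match pairs.reverse.find? (fun p => p.1 == (j : Int)) with
           | some p => some (some p.2)
           | none => ps[j]?) := by
  intro pairs
  induction pairs with
  | nil => intro ps j hj _; simp
  | cons p rest ih =>
    intro ps j hj hpos
    have hp0 : 0 ≤ p.1 := hpos p (List.mem_cons_self ..)
    have hset : PySem.List.pySetD ps p.1 (some p.2) = ps.set p.1.toNat (some p.2) :=
      PySem.List.pySetD_of_nonneg ps (some p.2) hp0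
    simp only [List.foldl_cons, List.reverse_cons, List.find?_append]
    rw [ih (PySem.List.pySetD ps p.1 (some p.2)) j
        (by rw [PySem.List.length_pySetD]; exact hj)
        (fun q hq => hpos q (List.mem_cons_of_mem _ hq))]
    cases hfind : rest.reverse.find? (fun q => q.1 == (j : Int)) with
    | some q => simp
    | none =>
      simp only [Option.none_or]
      by_cases hpj : p.1 = (j : Int)
      · have hb : (p.1 == (j:Int)) = true := by simp [hpj]
        have : (List.find? (fun p => p.1 == (j:Int)) [p]) = some p := by
          simp [List.find?, hb]
        rw [this, hset]
        have : p.1.toNat = j := by omega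
        rw [this]
        simp [List.getElem?_set_self hj]
      · have hb : (p.1 == (j:Int)) = false := by simp [hpj]
        have : (List.find? (fun p => p.1 == (j:Int)) [p]) = none := by
          simp [List.find?, hb]
        rw [this, hset]
        have hne : p.1.toNat ≠ j := by omega
        simp [List.getElem?_set_ne hne]

theorem foldl_settrue_getElem? :
    ∀ (ks : List Int) (b : List Bool) (j : Nat), j < b.length → (∀ c ∈ ks, 0 ≤ c) →
      (ks.foldl (fun b c => b.set c.toNat true) b)[j]?
        = if (j : Int) ∈ ks then some true else b[j]? := by
  intro ks
  induction ks with
  | nil => intro b j hj _; simp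
  | cons c rest ih =>
    intro b j hj hpos
    have hc0 : 0 ≤ c := hpos c (List.mem_cons_self ..)
    simp only [List.foldl_cons]
    rw [ih (b.set c.toNat true) j (by simpa using hj)
        (fun q hq => hpos q (List.mem_cons_of_mem _ hq))]
    by_cases hjr : (j : Int) ∈ rest
    · simp [hjr]
    · simp only [if_neg hjr]
      by_cases hcj : c = (j : Int)
      · have : c.toNat = j := by omega
        simp [List.mem_cons, hcj, List.getElem?_set_self hj]
      · have hne : c.toNat ≠ j := by omega
        have : ¬ ((j : Int) ∈ c :: rest) := by
          simp [List.mem_cons, hjr]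
          omega
        simp [this, List.getElem?_set_ne hne]

theorem find?_key_nodup {l : List (Int × Int)} {j : Int} {v : Int}
    (hnd : (l.map Prod.fst).Nodup) (hm : (j, v) ∈ l) :
    l.find? (fun p => p.1 == j) = some (j, v) := by
  induction l with
  | nil => simp at hm
  | cons p rest ih =>
    simp only [List.map_cons, List.nodup_cons] at hnd
    rcases List.mem_cons.mp hm with rfl | hm'
    · simp [List.find?]
    · have hne : p.1 ≠ j := by
        intro hEq
        exact hnd.1 (by rw [hEq]; exact List.mem_map.mpr ⟨(j, v), hm', rfl⟩)
      have hbeq : (p.1 == j) = false := by simp [hne]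
      simp only [List.find?, hbeq]
      exact ih hnd.2 hm'


-- the child/parent write list of B, and the undirected edge list of A ------
def pvPairs (fc ns : List (Option Int)) : List (Int × Int) :=
  (List.range fc.length).flatMap (fun i => (pvKids fc ns i).map (fun c => (c, (i : Int))))

def pvEPairs (fc ns : List (Option Int)) : List (Int × Int) :=
  (List.range fc.length).flatMap
    (fun i => (pvKids fc ns i).flatMap (fun c => [((i : Int), c), (c, (i : Int))]))

def pvEdge (fc ns : List (Option Int)) (u v : Int) : Prop :=
  ∃ i, i < fc.length ∧ ((u = (i : Int) ∧ v ∈ pvKids fc ns i) ∨ (v = (i : Int) ∧ u ∈ pvKids fc ns i))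

theorem mem_pvChildren {fc ns : List (Option Int)} {c : Int} :
    c ∈ pvChildren fc ns ↔ ∃ i, i < fc.length ∧ c ∈ pvKids fc ns i := by
  simp [pvChildren, List.mem_flatMap, List.mem_range]

theorem pvKids_valid {fc ns : List (Option Int)} {i : Nat} (h : pvOkAt fc ns i = true)
    {c : Int} (hc : c ∈ pvKids fc ns i) :
    0 ≤ c ∧ c.toNat < fc.length ∧ c.toNat < ns.length :=
  pvChain?_mem (pvChain?_of_okAt h) c hc

theorem pvParIdx_spec {fc ns : List (Option Int)} {c : Int} (hc : c ∈ pvChildren fc ns) :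
    pvParIdx fc ns c < fc.length ∧ c ∈ pvKids fc ns (pvParIdx fc ns c) := by
  obtain ⟨i, hi, hk⟩ := mem_pvChildren.mp hc
  have hsome : ((List.range fc.length).find? (fun i => decide (c ∈ pvKids fc ns i))).isSome :=
    List.find?_isSome.mpr ⟨i, List.mem_range.mpr hi, by simpa using hk⟩
  match hfind : (List.range fc.length).find? (fun i => decide (c ∈ pvKids fc ns i)) with
  | none => rw [hfind] at hsome; simp at hsome
  | some a =>
    have h1 : a ∈ List.range fc.length := List.mem_of_find?_eq_some hfind
    have h2 := List.find?_some hfind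
    unfold pvParIdx
    rw [hfind]
    exact ⟨List.mem_range.mp h1, by simpa using h2⟩

theorem sum_two_le {n i i' : Nat} (g : Nat → Nat) (hi : i < n) (hi' : i' < n) (hne : i ≠ i') :
    g i + g i' ≤ ((List.range n).map g).sum := by
  have h1 : ((List.range n).filter (fun x => x = i ∨ x = i')).Perm [i, i'] := by
    apply List.perm_of_nodup_nodup_toFinset_eq
    · exact (List.nodup_range).filter _
    · simp [List.nodup_cons, hne]
    · ext x
      simp only [List.toFinset_filter, List.toFinset_range, Finset.mem_filter, Finset.mem_range,
        List.toFinset_cons, List.toFinset_nil, Finset.mem_insert, decide_eq_true_eq]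
      constructor
      · rintro ⟨_, h⟩; simpa using h
      · intro h
        have hx : x = i ∨ x = i' := by simpa using h
        rcases hx with rfl | rfl <;> simp [hi, hi']
  calc g i + g i' = (((List.range n).filter (fun x => x = i ∨ x = i')).map g).sum := by
        rw [List.Perm.sum_eq (h1.map g)]; simp
    _ ≤ ((List.range n).map g).sum :=
        List.Sublist.sum_le_sum ((List.filter_sublist).map g) (fun x _ => Nat.zero_le x)

theorem pvKids_disjoint {fc ns : List (Option Int)} (hnd : (pvChildren fc ns).Nodup)
    {c : Int} {i i' : Nat} (hi : i < fc.length) (hi' : i' < fc.length)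
    (hc : c ∈ pvKids fc ns i) (hc' : c ∈ pvKids fc ns i') : i = i' := by
  by_contra hne
  have hcount : (pvChildren fc ns).count c
      = ((List.range fc.length).map (fun x => (pvKids fc ns x).count c)).sum := by
    unfold pvChildren
    rw [List.flatMap, List.count_flatten, List.map_map]; rfl
  have h2 : 2 ≤ (pvChildren fc ns).count c := by
    have := sum_two_le (fun x => (pvKids fc ns x).count c) hi hi' hne
    simp only at this
    have hci : 1 ≤ (pvKids fc ns i).count c := List.one_le_count_iff.mpr hc
    have hci' : 1 ≤ (pvKids fc ns i').count c := List.one_le_count_iff.mpr hc'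
    omega
  have := List.nodup_iff_count_le_one.mp hnd c
  omega

theorem pvParIdx_eq {fc ns : List (Option Int)} (hnd : (pvChildren fc ns).Nodup)
    {c : Int} {i : Nat} (hi : i < fc.length) (hc : c ∈ pvKids fc ns i) :
    pvParIdx fc ns c = i := by
  have h1 := pvParIdx_spec (mem_pvChildren.mpr ⟨i, hi, hc⟩)
  exact pvKids_disjoint hnd h1.1 hi h1.2 hc

theorem pvPairs_keys {fc ns : List (Option Int)} :
    (pvPairs fc ns).map Prod.fst = pvChildren fc ns := by
  simp [pvPairs, pvChildren, List.map_flatMap, List.map_map, Function.comp_def]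

theorem mem_pvPairs {fc ns : List (Option Int)} {c v : Int} :
    (c, v) ∈ pvPairs fc ns ↔ ∃ i, i < fc.length ∧ c ∈ pvKids fc ns i ∧ v = (i : Int) := by
  simp only [pvPairs, List.mem_flatMap, List.mem_range, List.mem_map, Prod.mk.injEq]
  constructor
  · rintro ⟨i, hi, c', hc', rfl, rfl⟩; exact ⟨i, hi, hc', rfl⟩
  · rintro ⟨i, hi, hc, rfl⟩; exact ⟨i, hi, c, hc, rfl, rfl⟩

theorem mem_pvEPairs {fc ns : List (Option Int)} {u v : Int} :
    (u, v) ∈ pvEPairs fc ns ↔ pvEdge fc ns u v := by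
  simp only [pvEPairs, pvEdge, List.mem_flatMap, List.mem_range, List.mem_cons,
    Prod.mk.injEq, List.not_mem_nil, or_false]
  constructor
  · rintro ⟨i, hi, c, hc, (⟨rfl, rfl⟩ | ⟨rfl, rfl⟩)⟩
    · exact ⟨i, hi, Or.inl ⟨rfl, hc⟩⟩
    · exact ⟨i, hi, Or.inr ⟨rfl, hc⟩⟩
  · rintro ⟨i, hi, (⟨rfl, hv⟩ | ⟨rfl, hu⟩)⟩
    · exact ⟨i, hi, v, hv, Or.inl ⟨rfl, rfl⟩⟩
    · exact ⟨i, hi, u, hu, Or.inr ⟨rfl, rfl⟩⟩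

-- B's parents array -------------------------------------------------------
theorem alt_parents_eq {fc ns : List (Option Int)}
    (h1 : ∀ i ∈ List.range fc.length, pvOkAt fc ns i = true) :
    (List.range fc.length).foldl
        (fun ps (i : Nat) => pvBWalk ns (i : Int) (fc.length + 2 * ns.length + 1)
          (fc.getD i none) ps)
        (List.replicate fc.length (none : Option Int))
      = (pvPairs fc ns).foldl (fun ps p => PySem.List.pySetD ps p.1 (some p.2))
          (List.replicate fc.length (none : Option Int)) := by
  have step1 : ∀ (l : List Nat), (∀ i ∈ l, pvOkAt fc ns i = true) →
      ∀ ps : List (Option Int), fc.length ≤ ps.length →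
      l.foldl (fun ps (i : Nat) => pvBWalk ns (i : Int) (fc.length + 2 * ns.length + 1)
          (fc.getD i none) ps) ps
        = l.foldl (fun ps (i : Nat) =>
            (pvKids fc ns i).foldl (fun ps c => PySem.List.pySetD ps c (some (i : Int))) ps) ps := by
    intro l
    induction l with
    | nil => intro _ ps _; rfl
    | cons i rest ih =>
      intro hok ps hlen
      simp only [List.foldl_cons]
      rw [pvBWalk_eq ps hlen
          (pvChain?_mono (by omega) (pvChain?_of_okAt (hok i (List.mem_cons_self ..))))]
      exact ih (fun w hw => hok w (List.mem_cons_of_mem _ hw)) _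
        (by rw [writeFold_length]; exact hlen)
  rw [step1 (List.range fc.length) h1 _ (by simp)]
  rw [foldl_inner_flatMap (K := pvKids fc ns)
      (g := fun s c (i : Nat) => PySem.List.pySetD s c (some (i : Int)))]
  have hmap : pvPairs fc ns
      = ((List.range fc.length).flatMap (fun i => (pvKids fc ns i).map (fun c => (c, i)))).map
          (fun p => (p.1, (p.2 : Int))) := by
    unfold pvPairs
    rw [List.map_flatMap]
    simp [List.map_map, Function.comp_def]
  rw [hmap, List.foldl_map]

-- all writes target valid nonneg indices
theorem pvPairs_pos {fc ns : List (Option Int)}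
    (h1 : ∀ i ∈ List.range fc.length, pvOkAt fc ns i = true) :
    ∀ p ∈ pvPairs fc ns, 0 ≤ p.1 := by
  rintro ⟨c, v⟩ hp
  obtain ⟨i, hi, hc, _⟩ := mem_pvPairs.mp hp
  exact (pvKids_valid (h1 i (List.mem_range.mpr hi)) hc).1

theorem altps_getElem? {fc ns : List (Option Int)}
    (h1 : ∀ i ∈ List.range fc.length, pvOkAt fc ns i = true) {j : Nat} (hj : j < fc.length) :
    ((pvPairs fc ns).foldl (fun ps p => PySem.List.pySetD ps p.1 (some p.2))
        (List.replicate fc.length (none : Option Int)))[j]?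
      = (match (pvPairs fc ns).reverse.find? (fun p => p.1 == (j : Int)) with
         | some p => some (some p.2)
         | none => some none) := by
  have := foldl_pySetD_getElem? (pvPairs fc ns)
    (List.replicate fc.length (none : Option Int)) j (by simpa using hj) (pvPairs_pos h1)
  rw [this]
  cases (pvPairs fc ns).reverse.find? (fun p => p.1 == (j : Int)) with
  | some p => rfl
  | none => simp [hj]

theorem altps_child {fc ns : List (Option Int)}
    (h1 : ∀ i ∈ List.range fc.length, pvOkAt fc ns i = true)
    (hnd : (pvChildren fc ns).Nodup) {j : Nat} (hj : j < fc.length)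
    (hc : (j : Int) ∈ pvChildren fc ns) :
    ((pvPairs fc ns).foldl (fun ps p => PySem.List.pySetD ps p.1 (some p.2))
        (List.replicate fc.length (none : Option Int)))[j]?
      = some (some ((pvParIdx fc ns (j : Int) : Nat) : Int)) := by
  rw [altps_getElem? h1 hj]
  have hspec := pvParIdx_spec hc
  have hmem : ((j : Int), ((pvParIdx fc ns (j : Int) : Nat) : Int)) ∈ (pvPairs fc ns).reverse :=
    List.mem_reverse.mpr (mem_pvPairs.mpr ⟨pvParIdx fc ns (j : Int), hspec.1, hspec.2, rfl⟩)
  have hndk : ((pvPairs fc ns).reverse.map Prod.fst).Nodup := by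
    rw [List.map_reverse, List.nodup_reverse, pvPairs_keys]; exact hnd
  rw [find?_key_nodup hndk hmem]

theorem altps_nonchild {fc ns : List (Option Int)}
    (h1 : ∀ i ∈ List.range fc.length, pvOkAt fc ns i = true) {j : Nat} (hj : j < fc.length)
    (hc : (j : Int) ∉ pvChildren fc ns) :
    ((pvPairs fc ns).foldl (fun ps p => PySem.List.pySetD ps p.1 (some p.2))
        (List.replicate fc.length (none : Option Int)))[j]?
      = some none := by
  rw [altps_getElem? h1 hj]
  have : (pvPairs fc ns).reverse.find? (fun p => p.1 == (j : Int)) = none := by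
    rw [List.find?_eq_none]
    intro p hp hbeq
    apply hc
    have : p.1 = (j : Int) := by simpa using hbeq
    rw [← this, ← pvPairs_keys]
    exact List.mem_map.mpr ⟨p, List.mem_reverse.mp hp, rfl⟩
  rw [this]

theorem altps_child_isSome {fc ns : List (Option Int)}
    (h1 : ∀ i ∈ List.range fc.length, pvOkAt fc ns i = true) {j : Nat} (hj : j < fc.length)
    (hc : (j : Int) ∈ pvChildren fc ns) :
    ∃ v : Int, ((pvPairs fc ns).foldl (fun ps p => PySem.List.pySetD ps p.1 (some p.2))
        (List.replicate fc.length (none : Option Int)))[j]?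
      = some (some v) := by
  rw [altps_getElem? h1 hj]
  obtain ⟨i, hi, hk⟩ := mem_pvChildren.mp hc
  have hmem : ((j : Int), (i : Int)) ∈ (pvPairs fc ns).reverse :=
    List.mem_reverse.mpr (mem_pvPairs.mpr ⟨i, hi, hk, rfl⟩)
  have : ((pvPairs fc ns).reverse.find? (fun p => p.1 == (j : Int))).isSome := by
    rw [List.find?_isSome]
    exact ⟨_, hmem, by simp⟩
  match hfind : (pvPairs fc ns).reverse.find? (fun p => p.1 == (j : Int)) with
  | some p => exact ⟨p.2, by rw [hfind]⟩
  | none => rw [hfind] at this; simp at this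

-- A's is_child array ------------------------------------------------------
theorem isA_eq {fc ns : List (Option Int)}
    (h1 : ∀ i ∈ List.range fc.length, pvOkAt fc ns i = true) :
    (List.range fc.length).foldl
        (fun b (i : Nat) => pvAWalk2 ns fc.length fc.length (fc.getD i none) b)
        (List.replicate fc.length false)
      = (List.range fc.length).map (fun (j : Nat) => decide ((j : Int) ∈ pvChildren fc ns)) := by
  have e1 := PySem.List.foldl_congr_mem'
      (l := List.range fc.length) (init := List.replicate fc.length false)
      (f := fun b (i : Nat) => pvAWalk2 ns fc.length fc.length (fc.getD i none) b)
      (g := fun b (i : Nat) => (pvKids fc ns i).foldl (fun b c => b.set c.toNat true) b)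
      (fun i hi b => pvAWalk2_eq b (pvChain?_of_okAt (h1 i hi)))
  rw [e1]
  have e15 := foldl_inner_flatMap (K := pvKids fc ns)
      (g := fun (b : List Bool) (c : Int) (_ : Nat) => b.set c.toNat true)
      (List.range fc.length) (List.replicate fc.length false)
  beta_reduce at e15
  rw [e15]
  have e2 : ((List.range fc.length).flatMap
        (fun i => (pvKids fc ns i).map (fun c => (c, i)))).foldl
          (fun b (p : Int × Nat) => b.set p.1.toNat true) (List.replicate fc.length false)
      = (pvChildren fc ns).foldl (fun b c => b.set c.toNat true)
          (List.replicate fc.length false) := by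
    have : pvChildren fc ns = ((List.range fc.length).flatMap
        (fun i => (pvKids fc ns i).map (fun c => (c, i)))).map Prod.fst := by
      simp [pvChildren, List.map_flatMap, List.map_map, Function.comp_def]
    rw [this, List.foldl_map]
  rw [e2]
  have hpos : ∀ c ∈ pvChildren fc ns, 0 ≤ c := by
    intro c hc
    obtain ⟨i, hi, hk⟩ := mem_pvChildren.mp hc
    exact (pvKids_valid (h1 i (List.mem_range.mpr hi)) hk).1
  apply List.ext_getElem?
  intro j
  by_cases hj : j < fc.length
  · rw [foldl_settrue_getElem? (pvChildren fc ns) _ j (by simpa using hj) hpos]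
    rw [List.getElem?_map, List.getElem?_range hj]
    by_cases hjc : (j : Int) ∈ pvChildren fc ns
    · simp [hjc]
    · simp [hjc, hj]
  · have hlen : ((pvChildren fc ns).foldl (fun b c => b.set c.toNat true)
        (List.replicate fc.length false)).length = fc.length := by
      have : ∀ (ks : List Int) (b : List Bool),
          (ks.foldl (fun b c => b.set c.toNat true) b).length = b.length := by
        intro ks
        induction ks with
        | nil => intro b; rfl
        | cons c rest ih => intro b; simp only [List.foldl_cons]; rw [ih, List.length_set]
      rw [this]; simp
    rw [List.getElem?_eq_none (by omega), List.getElem?_eq_none (by simpa [hlen] using hj)]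

theorem index?_map_range_false (f : Nat → Bool) (n : Nat) :
    PySem.List.index? ((List.range n).map f) false
      = (List.range n).find? (fun j => !f j) := by
  induction n with
  | zero => simp [PySem.List.index?_eq_idxOf?]
  | succ n ih =>
    rw [List.range_succ, List.map_append, List.find?_append]
    by_cases hmem : false ∈ (List.range n).map f
    · rw [PySem.List.index?_append_of_mem _ hmem, ih]
      obtain ⟨j, hj, hfj⟩ := List.mem_map.mp hmem
      have : ((List.range n).find? (fun j => !f j)).isSome :=
        List.find?_isSome.mpr ⟨j, hj, by simp [hfj]⟩
      obtain ⟨a, hfind⟩ := Option.isSome_iff_exists.mp this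
      rw [hfind]
      simp
    · have hnone : (List.range n).find? (fun j => !f j) = none := by
        rw [List.find?_eq_none]
        intro j hj hb
        exact hmem (List.mem_map.mpr ⟨j, hj, by revert hb; cases f j <;> simp⟩)
      rw [hnone]
      by_cases hfn : f n = false
      · rw [show List.map f [n] = [false] by simp [hfn]]
        rw [PySem.List.index?_append_singleton_self (l := List.map f (List.range n)) (c := false) hmem]
        simp [List.find?, hfn, List.length_map, List.length_range]
      · have hfn' : f n = true := by revert hfn; cases f n <;> simp
        rw [show List.map f [n] = [true] by simp [hfn']]
        have : false ∉ (List.range n).map f ++ [true] := by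
          simp [hmem]
        rw [(PySem.List.index?_eq_none_iff _ _).mpr this]
        simp [List.find?, hfn']

-- A's adjacency dict ------------------------------------------------------
theorem adj0_getD {n : Nat} (u : Int) :
    (((List.range n).foldl (fun d (i : Nat) => d.insert (i : Int) ([] : List Int))
        PySem.Dict.empty).getD u ([] : List Int)) = [] := by
  suffices h : ∀ (l : List Nat) (d : PySem.Dict Int (List Int)),
      (∀ w, d.getD w ([] : List Int) = []) →
      ((l.foldl (fun d (i : Nat) => d.insert (i : Int) ([] : List Int)) d).getD u
        ([] : List Int)) = [] by
    exact h (List.range n) PySem.Dict.empty (fun w => by simp [PySem.Dict.getD_empty])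
  intro l
  induction l with
  | nil => intro d hd; exact hd u
  | cons x xs ih =>
    intro d hd
    simp only [List.foldl_cons]
    refine ih _ (fun w => ?_)
    rw [PySem.Dict.getD_insert]
    split <;> simp [hd]

theorem castRangeNodup (n : Nat) : ((List.range n).map (fun (i : Nat) => (i : Int))).Nodup := by
  refine List.Nodup.map ?_ List.nodup_range
  intro a b h
  simpa using h

theorem adj0_keys {n : Nat} :
    ((List.range n).foldl (fun d (i : Nat) => d.insert (i : Int) ([] : List Int))
        PySem.Dict.empty).keys
      = (List.range n).map (fun (i : Nat) => (i : Int)) := by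
  rw [PySem.Dict.keys_foldl_insert_key (key := fun (i : Nat) => (i : Int))
      (f := fun _ _ => ([] : List Int))]
  rw [PySem.Dict.keys_empty, PySem.Set.update_nil_left]
  exact PySem.Set.ofList_eq_self_of_nodup _ (castRangeNodup n)

theorem adj_eq {fc ns : List (Option Int)}
    (h1 : ∀ i ∈ List.range fc.length, pvOkAt fc ns i = true) :
    fcns_to_al_tree fc ns
      = (pvEPairs fc ns).foldl (fun d p => d.modify p.1 [] (· ++ [p.2]))
          ((List.range fc.length).foldl (fun d (i : Nat) => d.insert (i : Int) ([] : List Int))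
            PySem.Dict.empty) := by
  unfold fcns_to_al_tree
  have e1 := PySem.List.foldl_congr_mem'
      (l := List.range fc.length)
      (init := (List.range fc.length).foldl (fun d (i : Nat) => d.insert (i : Int) ([] : List Int))
        PySem.Dict.empty)
      (f := fun d (i : Nat) => pvAWalk1 ns fc.length (i : Int) fc.length (fc.getD i none) d)
      (g := fun d (i : Nat) => (pvKids fc ns i).foldl
        (fun d c => (d.modify (i : Int) [] (· ++ [c])).modify c [] (· ++ [(i : Int)])) d)
      (fun i hi d => pvAWalk1_eq d (pvChain?_of_okAt (h1 i hi)))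
  rw [e1]
  have e3 := PySem.List.foldl_congr_mem'
      (l := List.range fc.length)
      (init := (List.range fc.length).foldl (fun d (i : Nat) => d.insert (i : Int) ([] : List Int))
        PySem.Dict.empty)
      (f := fun d (i : Nat) => (pvKids fc ns i).foldl
        (fun d c => (d.modify (i : Int) [] (· ++ [c])).modify c [] (· ++ [(i : Int)])) d)
      (g := fun d (i : Nat) =>
        ((pvKids fc ns i).flatMap (fun c => [((i : Int), c), (c, (i : Int))])).foldl
          (fun d p => d.modify p.1 [] (· ++ [p.2])) d)
      (fun i _ d => by
        have := (List.foldl_flatMap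
          (f := fun c => [((i : Int), c), (c, (i : Int))])
          (g := fun (d : PySem.Dict Int (List Int)) (p : Int × Int) => d.modify p.1 [] (· ++ [p.2]))
          (l := pvKids fc ns i) (init := d)).symm
        simpa using this)
  rw [e3]
  unfold pvEPairs
  rw [List.foldl_flatMap]

theorem adj_getD {fc ns : List (Option Int)}
    (h1 : ∀ i ∈ List.range fc.length, pvOkAt fc ns i = true) (u : Int) :
    (fcns_to_al_tree fc ns).getD u ([] : List Int)
      = ((pvEPairs fc ns).filter (fun p => p.1 == u)).map (·.2) := by
  rw [adj_eq h1, PySem.Dict.getD_foldl_modify_append, adj0_getD]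
  simp

theorem adj_mem {fc ns : List (Option Int)}
    (h1 : ∀ i ∈ List.range fc.length, pvOkAt fc ns i = true) {u v : Int} :
    v ∈ (fcns_to_al_tree fc ns).getD u ([] : List Int) ↔ pvEdge fc ns u v := by
  rw [adj_getD h1, ← mem_pvEPairs]
  constructor
  · intro hv
    obtain ⟨p, hp, hpv⟩ := List.mem_map.mp hv
    have hf := List.mem_filter.mp hp
    have hu : p.1 = u := by simpa using hf.2
    have hpe : p = (u, v) := by
      rcases p with ⟨a, b⟩; simp_all
    rw [← hpe]; exact hf.1
  · intro hv
    exact List.mem_map.mpr ⟨(u, v), List.mem_filter.mpr ⟨hv, by simp⟩, rfl⟩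

theorem adj_keys {fc ns : List (Option Int)}
    (h1 : ∀ i ∈ List.range fc.length, pvOkAt fc ns i = true) :
    (fcns_to_al_tree fc ns).keys = (List.range fc.length).map (fun (i : Nat) => (i : Int)) := by
  rw [adj_eq h1, PySem.Dict.keys_foldl_modify_key (key := fun (p : Int × Int) => p.1)
      (d0 := ([] : List Int)) (f := fun _ p => (· ++ [p.2]))]
  rw [adj0_keys, PySem.Set.update_eq_append_filter]
  have hnil : (PySem.Set.ofList ((pvEPairs fc ns).map (fun p => p.1))).filter
      (fun y => !(PySem.Set.contains ((List.range fc.length).map (fun (i : Nat) => (i : Int))) y))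
        = [] := by
    rw [List.filter_eq_nil_iff]
    intro y hy
    have hy' : y ∈ (pvEPairs fc ns).map (fun p => p.1) := (PySem.Set.mem_ofList _ _).mp hy
    obtain ⟨p, hp, rfl⟩ := List.mem_map.mp hy'
    rcases p with ⟨a, b⟩
    have hedge := mem_pvEPairs.mp hp
    have hmem : (a : Int) ∈ (List.range fc.length).map (fun (i : Nat) => (i : Int)) := by
      obtain ⟨i, hi, hcase⟩ := hedge
      rcases hcase with ⟨rfl, hb⟩ | ⟨_, ha⟩
      · exact List.mem_map.mpr ⟨i, List.mem_range.mpr hi, rfl⟩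
      · have hv := pvKids_valid (h1 i (List.mem_range.mpr hi)) ha
        refine List.mem_map.mpr ⟨a.toNat, List.mem_range.mpr hv.2.1, by omega⟩
    simp [hmem]
  rw [hnil, List.append_nil]

theorem adj_size {fc ns : List (Option Int)}
    (h1 : ∀ i ∈ List.range fc.length, pvOkAt fc ns i = true) :
    (fcns_to_al_tree fc ns).size = fc.length := by
  have hk := adj_keys h1
  have hlen : (fcns_to_al_tree fc ns).keys.length = fc.length := by
    rw [hk, List.length_map, List.length_range]
  simpa [PySem.Dict.keys, PySem.Dict.size] using hlen

-- roots, parents and reachability -----------------------------------------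
theorem pvRoot?_spec {fc ns : List (Option Int)} {r : Nat} (hr : pvRoot? fc ns = some r) :
    r < fc.length ∧ (r : Int) ∉ pvChildren fc ns := by
  have h1 := List.mem_of_find?_eq_some hr
  have h2 := List.find?_some hr
  exact ⟨List.mem_range.mp h1, by simpa using h2⟩

theorem pvRoot?_none {fc ns : List (Option Int)} (hr : pvRoot? fc ns = none) :
    ∀ j, j < fc.length → (j : Int) ∈ pvChildren fc ns := by
  intro j hj
  have := List.find?_eq_none.mp hr j (List.mem_range.mpr hj)
  simpa using this

theorem pvPStep_none {fc ns : List (Option Int)} (k : Nat) :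
    (pvPStep fc ns)^[k] none = none :=
  Function.iterate_fixed rfl k

theorem pvReaches_iff {fc ns : List (Option Int)} {r : Nat} {c : Int} :
    pvReaches fc ns r c = true
      ↔ ∃ k, k ≤ fc.length ∧ (pvPStep fc ns)^[k] (some c) = some ((r : Nat) : Int) := by
  unfold pvReaches
  rw [List.any_eq_true]
  constructor
  · rintro ⟨k, hk, hit⟩
    exact ⟨k, by simpa [Nat.lt_succ_iff] using List.mem_range.mp hk, by simpa using hit⟩
  · rintro ⟨k, hk, hit⟩
    exact ⟨k, List.mem_range.mpr (by omega), by simpa using hit⟩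

-- every node that has children is the root or itself a child
theorem parent_root_or_child {fc ns : List (Option Int)}
    (hnd : (pvChildren fc ns).Nodup) {r : Nat} (hr : pvRoot? fc ns = some r)
    (hreach : ∀ c ∈ pvChildren fc ns, pvReaches fc ns r c = true)
    {i : Nat} (hi : i < fc.length) {c : Int} (hc : c ∈ pvKids fc ns i) :
    i = r ∨ (i : Int) ∈ pvChildren fc ns := by
  have hcc : c ∈ pvChildren fc ns := mem_pvChildren.mpr ⟨i, hi, hc⟩
  obtain ⟨k, hk, hit⟩ := pvReaches_iff.mp (hreach c hcc)
  have hrnc := (pvRoot?_spec hr).2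
  match k with
  | 0 =>
    simp only [Function.iterate_zero_apply, Option.some.injEq] at hit
    exact absurd (hit ▸ hcc) hrnc
  | k+1 =>
    rw [Function.iterate_succ_apply] at hit
    have hstep : pvPStep fc ns (some c) = some ((pvParIdx fc ns c : Nat) : Int) := by
      simp [pvPStep, hcc]
    rw [hstep] at hit
    have hpi : pvParIdx fc ns c = i := pvParIdx_eq hnd hi hc
    rw [hpi] at hit
    match k with
    | 0 =>
      simp only [Function.iterate_zero_apply, Option.some.injEq] at hit
      left; exact_mod_cast hit
    | k+1 =>
      rw [Function.iterate_succ_apply] at hit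
      by_cases hic : (i : Int) ∈ pvChildren fc ns
      · right; exact hic
      · rw [show pvPStep fc ns (some (i : Int)) = none by simp [pvPStep, hic],
           pvPStep_none] at hit
        simp at hit

theorem reach_in_vis {fc ns : List (Option Int)}
    (hnd : (pvChildren fc ns).Nodup) {r : Nat} (hr : pvRoot? fc ns = some r)
    (hreach : ∀ c ∈ pvChildren fc ns, pvReaches fc ns r c = true)
    {vis : List Int} (hr0 : (r : Int) ∈ vis)
    (hclosed : ∀ w ∈ vis, ∀ v, pvEdge fc ns w v → v ∈ vis) :
    ∀ (k : Nat) (c : Int), (pvPStep fc ns)^[k] (some c) = some ((r : Nat) : Int) →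
      (c = (r : Int) ∨ c ∈ pvChildren fc ns) → c ∈ vis := by
  intro k
  induction k with
  | zero =>
    intro c hit _
    simp only [Function.iterate_zero_apply, Option.some.injEq] at hit
    rw [hit]; exact hr0
  | succ k ih =>
    intro c hit hcase
    rcases hcase with rfl | hcc
    · exact hr0
    · rw [Function.iterate_succ_apply, show pvPStep fc ns (some c)
          = some ((pvParIdx fc ns c : Nat) : Int) by simp [pvPStep, hcc]] at hit
      have hspec := pvParIdx_spec hcc
      have hpcase := parent_root_or_child hnd hr hreach hspec.1 hspec.2
      have hpvis : ((pvParIdx fc ns c : Nat) : Int) ∈ vis := by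
        apply ih _ hit
        rcases hpcase with h | h
        · left; exact_mod_cast h
        · right; exact h
      exact hclosed _ hpvis c ⟨pvParIdx fc ns c, hspec.1, Or.inl ⟨rfl, hspec.2⟩⟩

-- the BFS invariant --------------------------------------------------------
def pvTgt (fc ns : List (Option Int)) (j : Nat) : Option Int :=
  if (j : Int) ∈ pvChildren fc ns then some ((pvParIdx fc ns (j : Int) : Nat) : Int) else none

def pvInv (fc ns : List (Option Int)) (r : Nat) (q vis : List Int) (ps : List (Option Int)) : Prop :=
  vis.Nodup ∧
  ((r : Int) ∈ vis) ∧
  (∀ v ∈ vis, v = (r : Int) ∨ v ∈ pvChildren fc ns) ∧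
  (∀ v ∈ vis, ∃ j : Nat, j < fc.length ∧ v = (j : Int)) ∧
  (∀ v ∈ vis, v ≠ (r : Int) → ((pvParIdx fc ns v : Nat) : Int) ∈ vis) ∧
  (∀ u ∈ q, u ∈ vis) ∧
  ps.length = fc.length ∧
  (∀ j : Nat, j < fc.length →
    ps[j]? = some (if (j : Int) ∈ vis ∧ (j : Int) ≠ (r : Int)
      then some ((pvParIdx fc ns (j : Int) : Nat) : Int) else none))

theorem pvInv_vis_le {fc ns : List (Option Int)} {r : Nat} {q vis : List Int}
    {ps : List (Option Int)} (h : pvInv fc ns r q vis ps) : vis.length ≤ fc.length := by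
  obtain ⟨hnodup, _, _, hrange, _⟩ := h
  have hsub : vis ⊆ (List.range fc.length).map (fun (j : Nat) => (j : Int)) := by
    intro v hv
    obtain ⟨j, hj, rfl⟩ := hrange v hv
    exact List.mem_map.mpr ⟨j, List.mem_range.mpr hj, rfl⟩
  calc vis.length = vis.toFinset.card := (List.toFinset_card_of_nodup hnodup).symm
    _ ≤ ((List.range fc.length).map (fun (j : Nat) => (j : Int))).toFinset.card :=
        Finset.card_le_card (fun x hx => by
          simp only [List.mem_toFinset] at *; exact hsub hx)
    _ ≤ ((List.range fc.length).map (fun (j : Nat) => (j : Int))).length :=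
        List.toFinset_card_le _
    _ = fc.length := by rw [List.length_map, List.length_range]

-- the inner 'for v in adj_list[u]' loop ------------------------------------
theorem bfs_inner {fc ns : List (Option Int)}
    (h1 : ∀ i ∈ List.range fc.length, pvOkAt fc ns i = true)
    (hnd : (pvChildren fc ns).Nodup) {r : Nat} (hr : pvRoot? fc ns = some r)
    {u : Int} :
    ∀ (nbrs : List Int) (q vis : List Int) (ps : List (Option Int)),
      (∀ v ∈ nbrs, pvEdge fc ns u v) → u ∈ vis → pvInv fc ns r q vis ps →
      ∃ (news : List Int) (ps' : List (Option Int)),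
        nbrs.foldl
          (fun (s : List Int × PySem.Set Int × List (Option Int)) v =>
            if PySem.Set.contains s.2.1 v then s
            else (s.1 ++ [v], PySem.Set.add s.2.1 v, PySem.List.pySetD s.2.2 v (some u)))
          (q, vis, ps) = (q ++ news, vis ++ news, ps') ∧
        pvInv fc ns r (q ++ news) (vis ++ news) ps' ∧
        (∀ v ∈ nbrs, v ∈ vis ++ news) := by
  intro nbrs
  induction nbrs with
  | nil =>
    intro q vis ps _ _ hinv
    exact ⟨[], ps, by simp, by simpa using hinv, by simp⟩
  | cons v rest ih =>
    intro q vis ps hedges hu hinv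
    obtain ⟨hnodup, hrvis, hmem, hrange, hparin, hqvis, hlen, hchar⟩ := hinv
    simp only [List.foldl_cons]
    by_cases hv : v ∈ vis
    · rw [if_pos (by rw [PySem.Set.contains_iff]; exact hv)]
      obtain ⟨news, ps', hst, hinv', hnb⟩ := ih q vis ps
        (fun w hw => hedges w (List.mem_cons_of_mem _ hw)) hu
        ⟨hnodup, hrvis, hmem, hrange, hparin, hqvis, hlen, hchar⟩
      exact ⟨news, ps', hst, hinv', by
        intro w hw
        rcases List.mem_cons.mp hw with rfl | hw'
        · exact List.mem_append_left _ hv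
        · exact hnb w hw'⟩
    · rw [if_neg (by rw [PySem.Set.contains_iff]; exact hv)]
      -- v is a fresh child discovered from its parent u
      have hedge := hedges v (List.mem_cons_self ..)
      obtain ⟨i, hi, hcase⟩ := hedge
      have hkey : u = (i : Int) ∧ v ∈ pvKids fc ns i := by
        rcases hcase with h | ⟨hvi, hui⟩
        · exact h
        · exfalso
          have huc : u ∈ pvChildren fc ns := mem_pvChildren.mpr ⟨i, hi, hui⟩
          have hur : u ≠ (r : Int) := by
            intro hEq; exact (pvRoot?_spec hr).2 (hEq ▸ huc)
          have := hparin u hu hur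
          rw [pvParIdx_eq hnd hi hui] at this
          exact hv (hvi ▸ this)
      obtain ⟨hui, hvk⟩ := hkey
      have hvc : v ∈ pvChildren fc ns := mem_pvChildren.mpr ⟨i, hi, hvk⟩
      have hvalid := pvKids_valid (h1 i (List.mem_range.mpr hi)) hvk
      have hvr : v ≠ (r : Int) := by
        intro hEq; exact (pvRoot?_spec hr).2 (hEq ▸ hvc)
      have hpv : pvParIdx fc ns v = i := pvParIdx_eq hnd hi hvk
      have hadd : PySem.Set.add vis v = vis ++ [v] := PySem.Set.add_of_not_mem hv
      have hset : PySem.List.pySetD ps v (some u) = ps.set v.toNat (some u) :=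
        PySem.List.pySetD_of_nonneg ps (some u) hvalid.1
      have hinv' : pvInv fc ns r (q ++ [v]) (vis ++ [v]) (PySem.List.pySetD ps v (some u)) := by
        refine ⟨?_, ?_, ?_, ?_, ?_, ?_, ?_, ?_⟩
        · simpa [List.nodup_append] using ⟨hnodup, fun a ha (hEq : a = v) => hv (hEq ▸ ha)⟩
        · exact List.mem_append_left _ hrvis
        · intro w hw
          rcases List.mem_append.mp hw with hw | hw
          · exact hmem w hw
          · right; rw [List.mem_singleton.mp hw]; exact hvc
        · intro w hw
          rcases List.mem_append.mp hw with hw | hw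
          · exact hrange w hw
          · have hwv := List.mem_singleton.mp hw
            have h0 := hvalid.1
            exact ⟨v.toNat, hvalid.2.1, by omega⟩
        · intro w hw hwr
          rcases List.mem_append.mp hw with hw | hw
          · exact List.mem_append_left _ (hparin w hw hwr)
          · rw [List.mem_singleton.mp hw, hpv, ← hui]
            exact List.mem_append_left _ hu
        · intro w hw
          rcases List.mem_append.mp hw with hw | hw
          · exact List.mem_append_left _ (hqvis w hw)
          · exact List.mem_append_right _ hw
        · rw [hset, List.length_set]; exact hlen
        · intro j hj
          rw [hset]
          by_cases hjv : j = v.toNat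
          · subst hjv
            rw [List.getElem?_set_self (by omega)]
            have hjvi : (v.toNat : Int) = v := by omega
            rw [if_pos ⟨by rw [hjvi]; exact List.mem_append_right _ (List.mem_singleton_self _),
              by rw [hjvi]; exact hvr⟩]
            rw [hjvi, hpv, hui]
          · rw [List.getElem?_set_ne (by omega), hchar j hj]
            have hjv' : ((j : Int) ∈ vis ++ [v]) ↔ ((j : Int) ∈ vis) := by
              rw [List.mem_append, List.mem_singleton]
              constructor
              · rintro (h | h)
                · exact h
                · exfalso; apply hjv; omega
              · exact Or.inl
            by_cases hjin : (j : Int) ∈ vis ∧ (j : Int) ≠ (r : Int)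
            · rw [if_pos hjin, if_pos ⟨hjv'.mpr hjin.1, hjin.2⟩]
            · rw [if_neg hjin, if_neg (by rw [not_and_or] at *; rcases hjin with h | h
                                          · exact Or.inl (fun hx => h (hjv'.mp hx))
                                          · exact Or.inr h)]
      obtain ⟨news, ps', hst, hinv'', hnb⟩ := ih (q ++ [v]) (vis ++ [v])
        (PySem.List.pySetD ps v (some u))
        (fun w hw => hedges w (List.mem_cons_of_mem _ hw))
        (List.mem_append_left _ hu) hinv'
      refine ⟨v :: news, ps', ?_, ?_, ?_⟩
      · rw [hadd, hst]
        simp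
      · simpa using hinv''
      · intro w hw
        rcases List.mem_cons.mp hw with rfl | hw'
        · simp
        · have := hnb w hw'
          simpa using this

theorem bfs_final {fc ns : List (Option Int)}
    (hnd : (pvChildren fc ns).Nodup) {r : Nat} (hr : pvRoot? fc ns = some r)
    (hreach : ∀ c ∈ pvChildren fc ns, pvReaches fc ns r c = true)
    {vis : List Int} {ps : List (Option Int)}
    (hinv : pvInv fc ns r [] vis ps)
    (hclosed : ∀ w ∈ vis, ∀ v, pvEdge fc ns w v → v ∈ vis) :
    ps = (List.range fc.length).map (pvTgt fc ns) := by
  obtain ⟨hnodup, hrvis, hmem, hrange, hparin, hqvis, hlen, hchar⟩ := hinv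
  apply List.ext_getElem?
  intro j
  by_cases hj : j < fc.length
  · rw [hchar j hj, List.getElem?_map, List.getElem?_range hj]
    unfold pvTgt
    by_cases hjc : (j : Int) ∈ pvChildren fc ns
    · have hvis : (j : Int) ∈ vis := by
        obtain ⟨k, hk, hit⟩ := pvReaches_iff.mp (hreach _ hjc)
        exact reach_in_vis hnd hr hreach hrvis hclosed k _ hit (Or.inr hjc)
      have hjr : (j : Int) ≠ (r : Int) := fun hEq => (pvRoot?_spec hr).2 (hEq ▸ hjc)
      rw [if_pos ⟨hvis, hjr⟩]
      simp [hjc]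
    · have hniv : ¬ ((j : Int) ∈ vis ∧ (j : Int) ≠ (r : Int)) := by
        rintro ⟨hv, hne⟩
        rcases hmem _ hv with h | h
        · exact hne h
        · exact hjc h
      rw [if_neg hniv]
      simp [hjc]
  · rw [List.getElem?_eq_none (by omega), List.getElem?_eq_none (by simp; omega)]

theorem bfs_run {fc ns : List (Option Int)}
    (h1 : ∀ i ∈ List.range fc.length, pvOkAt fc ns i = true)
    (hnd : (pvChildren fc ns).Nodup) {r : Nat} (hr : pvRoot? fc ns = some r)
    (hreach : ∀ c ∈ pvChildren fc ns, pvReaches fc ns r c = true) :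
    ∀ (fuel : Nat) (q vis : List Int) (ps : List (Option Int)),
      pvInv fc ns r q vis ps →
      (∀ w ∈ vis, w ∉ q → ∀ v, pvEdge fc ns w v → v ∈ vis) →
      fc.length - vis.length + q.length ≤ fuel →
      pvBFS (fcns_to_al_tree fc ns) fuel q vis ps
        = (List.range fc.length).map (pvTgt fc ns) := by
  intro fuel
  induction fuel with
  | zero =>
    intro q vis ps hinv hclosed hfuel
    have hq : q = [] := by
      have : q.length = 0 := by omega
      exact List.eq_nil_of_length_eq_zero this
    subst hq
    show ps = _
    exact bfs_final hnd hr hreach hinv (fun w hw => hclosed w hw (List.not_mem_nil))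
  | succ fuel ih =>
    intro q vis ps hinv hclosed hfuel
    match q with
    | [] =>
      show ps = _
      exact bfs_final hnd hr hreach hinv (fun w hw => hclosed w hw (List.not_mem_nil))
    | u :: q' =>
      obtain ⟨hnodup, hrvis, hmem, hrange, hparin, hqvis, hlen, hchar⟩ := hinv
      have hu : u ∈ vis := hqvis u (List.mem_cons_self ..)
      have hinvq' : pvInv fc ns r q' vis ps :=
        ⟨hnodup, hrvis, hmem, hrange, hparin,
          (fun w hw => hqvis w (List.mem_cons_of_mem _ hw)), hlen, hchar⟩
      obtain ⟨news, ps', hst, hinv', hnb⟩ := bfs_inner h1 hnd hr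
        ((fcns_to_al_tree fc ns).getD u ([] : List Int)) q' vis ps
        (fun v hv => (adj_mem h1).mp hv) hu hinvq'
      show pvBFS _ fuel _ _ _ = _
      rw [hst]
      apply ih (q' ++ news) (vis ++ news) ps' hinv'
      · intro w hw hwq v hedge
        rcases List.mem_append.mp hw with hwv | hwn
        · by_cases hwu : w = u
          · subst hwu
            exact hnb v ((adj_mem h1).mpr hedge)
          · have hwq' : w ∉ (u :: q') := by
              intro hmem'
              rcases List.mem_cons.mp hmem' with rfl | h
              · exact hwu rfl
              · exact hwq (List.mem_append_left _ h)
            exact List.mem_append_left _ (hclosed w hwv hwq' v hedge)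
        · exact absurd (List.mem_append_right _ hwn) hwq
      · have hle := pvInv_vis_le hinv'
        rw [List.length_append] at hle ⊢
        rw [List.length_append]
        have : (u :: q').length = q'.length + 1 := rfl
        omega

-- B's parents array is the target map -------------------------------------
theorem psB_eq_map {fc ns : List (Option Int)}
    (h1 : ∀ i ∈ List.range fc.length, pvOkAt fc ns i = true)
    (hnd : (pvChildren fc ns).Nodup) :
    (pvPairs fc ns).foldl (fun ps p => PySem.List.pySetD ps p.1 (some p.2))
        (List.replicate fc.length (none : Option Int))
      = (List.range fc.length).map (pvTgt fc ns) := by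
  apply List.ext_getElem?
  intro j
  by_cases hj : j < fc.length
  · rw [List.getElem?_map, List.getElem?_range hj]
    by_cases hjc : (j : Int) ∈ pvChildren fc ns
    · rw [altps_child h1 hnd hj hjc]; simp [pvTgt, hjc]
    · rw [altps_nonchild h1 hj hjc]; simp [pvTgt, hjc]
  · rw [List.getElem?_eq_none (by rw [foldl_pySetD_length]; simp; omega),
      List.getElem?_eq_none (by simp; omega)]

theorem none_not_mem_psB {fc ns : List (Option Int)}
    (h1 : ∀ i ∈ List.range fc.length, pvOkAt fc ns i = true)
    (hall : ∀ j, j < fc.length → (j : Int) ∈ pvChildren fc ns) :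
    (none : Option Int) ∉ (pvPairs fc ns).foldl
        (fun ps p => PySem.List.pySetD ps p.1 (some p.2))
        (List.replicate fc.length (none : Option Int)) := by
  intro hmem
  obtain ⟨j, hjlt, hget⟩ := List.getElem_of_mem hmem
  have hlen : ((pvPairs fc ns).foldl (fun ps p => PySem.List.pySetD ps p.1 (some p.2))
      (List.replicate fc.length (none : Option Int))).length = fc.length := by
    rw [foldl_pySetD_length]; simp
  have hj : j < fc.length := by omega
  obtain ⟨v, hv⟩ := altps_child_isSome h1 hj (hall j hj)
  rw [List.getElem?_eq_getElem hjlt, hget] at hv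
  simp at hv

-- the assembly -------------------------------------------------------------
theorem fcns_to_ap_eq_alt (fc ns : List (Option Int)) (hpre : Pre_fcns_to_ap fc ns) :
    fcns_to_ap fc ns = fcns_to_ap_alt fc ns := by
  obtain ⟨h1, hcase⟩ := hpre
  have hBfold := alt_parents_eq h1
  have hsize := adj_size h1
  have hidx : PySem.List.index?
      ((List.range fc.length).map (fun (j : Nat) => decide ((j : Int) ∈ pvChildren fc ns))) false
      = pvRoot? fc ns := by
    rw [index?_map_range_false]; rfl
  unfold fcns_to_ap fcns_to_ap_alt
  simp only
  rw [hBfold]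
  match hr : pvRoot? fc ns with
  | none =>
    have hall := pvRoot?_none hr
    have hnone := none_not_mem_psB h1 hall
    rw [if_neg hnone]
    by_cases hn : fc.length = 0
    · rw [if_pos (by rw [hsize, hn])]
    · rw [if_neg (by rw [hsize]; exact hn), isA_eq h1, hidx, hr]
  | some r =>
    obtain ⟨hrlt, hrnc⟩ := pvRoot?_spec hr
    rcases hcase with hall | ⟨hnd, hreach'⟩
    · exact absurd (hall r (List.mem_range.mpr hrlt)) hrnc
    · have hreach : ∀ c ∈ pvChildren fc ns, pvReaches fc ns r c = true := by
        intro c hc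
        have := hreach' c hc
        rwa [hr] at this
      have hpsB := psB_eq_map h1 hnd
      rw [hpsB]
      have hnmem : (none : Option Int) ∈ (List.range fc.length).map (pvTgt fc ns) :=
        List.mem_map.mpr ⟨r, List.mem_range.mpr hrlt, by simp [pvTgt, hrnc]⟩
      rw [if_pos hnmem]
      rw [if_neg (by rw [hsize]; omega), isA_eq h1, hidx, hr]
      unfold al_tree_to_ap
      simp only
      rw [hsize]
      have hvis0 : PySem.Set.add PySem.Set.empty ((r : Nat) : Int) = [((r : Nat) : Int)] := rfl
      rw [hvis0]
      apply bfs_run h1 hnd hr hreach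
      · refine ⟨List.nodup_singleton _, List.mem_singleton_self _, ?_, ?_, ?_, ?_, ?_, ?_⟩
        · intro v hv; left; exact List.mem_singleton.mp hv
        · intro v hv; exact ⟨r, hrlt, List.mem_singleton.mp hv⟩
        · intro v hv hvr; exact absurd (List.mem_singleton.mp hv) hvr
        · intro u hu; exact hu
        · simp
        · intro j hj
          rw [List.getElem?_replicate, if_pos hj]
          rw [if_neg (by rintro ⟨hv, hne⟩; exact hne (List.mem_singleton.mp hv))]
      · intro w hw hwq
        exact absurd hw hwq
      · simp
        omega

-- ===== VERDICT (by name: the statement is the Claim_ definition above) =====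
theorem fcns_to_ap_spec : Claim_equal_fcns_to_ap := by
  intro fc ns _ hpre
  unfold Spec_fcns_to_ap
  exact fcns_to_ap_eq_alt fc ns hpre
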